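-- pv_equiv track=rewrite | github.com/Pirate-Hunter-Zoro/Bayesian-Network | calculations_helper.py | find_row_sum_pairs
-- ===== SOURCE A (Python) =====
-- def find_row_sum_pairs(var: int, all_vars: list[int]) -> list[tuple[int,int]]:
--     """Given a variable that should be eliminated by summing over its possibilities, and the ordered list of all variables, find all of the pairs of rows that should be summed together to eliminate said variable
--
--     Args:
--         var (int): variable to eliminate
--         all_vars (list[int]): ordered list of all variables
--
--     Returns:
--         list[tuple[int,int]]: list of pairs of rows that should be summed together in the corresponding array of values
--     """
--     idx = all_vars.index(var)
--     binary_posn = len(all_vars) - 1 - idx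
--     row_pairs = []
--     prev_second = 1
--     i = 0
--     for _ in range(2**(len(all_vars)-1)):
--         # this is how many row pairs there will be - all other possible combinations of all other variables
--         first = i if i < prev_second else prev_second+1
--         second = first + 2**binary_posn
--         prev_second = second
--         i = first + 1
--         row_pairs.append([first,second])
--     return row_pairs
-- ===== SOURCE B (Python) =====
-- def find_row_sum_pairs(var: int, all_vars: list[int]) -> list[tuple[int,int]]:
--     # Closed form of the original's stateful loop: with step = 2**(len-1-idx),
--     # the loop emits [k, k+step] for k in range(2**(len-1)) when step > 1,
--     # and the disjoint pairs [2k, 2k+1] when step == 1.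
--     idx = all_vars.index(var)
--     step = 2 ** (len(all_vars) - 1 - idx)
--     half = 2 ** (len(all_vars) - 1)
--     if step == 1:
--         return [[2 * k, 2 * k + 1] for k in range(half)]
--     return [[k, k + step] for k in range(half)]
-- ===== Notes on version B (the rewrite author's own statement) =====
-- stated objective: simpler
-- what changed: Replaced the stateful incremental loop (prev_second/i trick, recomputing 2**binary_posn each iteration) with a direct closed-form comprehension over range(2**(len-1)) that emits each pair from its index k.
import Mathlib
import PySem

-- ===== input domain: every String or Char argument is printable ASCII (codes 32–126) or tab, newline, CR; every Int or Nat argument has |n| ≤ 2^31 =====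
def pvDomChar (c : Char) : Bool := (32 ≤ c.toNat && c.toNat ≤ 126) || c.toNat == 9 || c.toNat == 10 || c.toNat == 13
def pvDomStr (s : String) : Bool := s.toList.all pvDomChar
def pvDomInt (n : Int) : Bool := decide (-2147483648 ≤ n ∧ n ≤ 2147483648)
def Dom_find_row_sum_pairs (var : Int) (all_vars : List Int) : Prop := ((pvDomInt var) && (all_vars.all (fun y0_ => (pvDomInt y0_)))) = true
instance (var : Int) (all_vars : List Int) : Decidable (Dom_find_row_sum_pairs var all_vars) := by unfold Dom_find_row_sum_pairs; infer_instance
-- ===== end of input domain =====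

-- B replaces A's stateful incremental loop with a closed-form comprehension (simpler); return values only.

-- ===== PORT A =====
-- loop body of A: state is (row_pairs, prev_second, i); the loop counter is ignored
def pvBodyA (pw : Int) (st : List (List Int) × Int × Int) (_ : Nat) : List (List Int) × Int × Int :=
  let first : Int := if st.2.2 < st.2.1 then st.2.2 else st.2.1 + 1
  let second : Int := first + pw
  (st.1 ++ [[first, second]], second, first + 1)

def find_row_sum_pairs (var : Int) (all_vars : List Int) : List (List Int) :=
  match PySem.List.index? all_vars var with
  | none => []   -- Python raises ValueError here; excluded by Pre_
  | some idx =>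
    let binary_posn : Nat := all_vars.length - 1 - idx
    let st := (List.range (2 ^ (all_vars.length - 1))).foldl (pvBodyA ((2:Int) ^ binary_posn)) ([], 1, 0)
    st.1

-- ===== PORT B =====
def find_row_sum_pairs_alt (var : Int) (all_vars : List Int) : List (List Int) :=
  match PySem.List.index? all_vars var with
  | none => []   -- Python raises ValueError here; excluded by Pre_
  | some idx =>
    let step : Int := (2:Int) ^ (all_vars.length - 1 - idx)
    let half : Nat := 2 ^ (all_vars.length - 1)
    if step == 1 then (List.range half).map (fun k => [2 * (k:Int), 2 * (k:Int) + 1])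
    else (List.range half).map (fun k => [(k:Int), (k:Int) + step])

-- ===== PRECONDITION & SPEC =====
-- Pre_ excludes exactly the inputs where Python's list.index raises ValueError (var not in the list).
def Pre_find_row_sum_pairs (var : Int) (all_vars : List Int) : Prop := var ∈ all_vars
instance (var : Int) (all_vars : List Int) : Decidable (Pre_find_row_sum_pairs var all_vars) := by unfold Pre_find_row_sum_pairs; infer_instance
def pvWitness_find_row_sum_pairs : Int × List Int := (2, [1, 2, 3])

def Spec_find_row_sum_pairs (var : Int) (all_vars : List Int) (out : List (List Int)) : Prop := out = find_row_sum_pairs_alt var all_vars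
instance (var : Int) (all_vars : List Int) (out : List (List Int)) : Decidable (Spec_find_row_sum_pairs var all_vars out) := by unfold Spec_find_row_sum_pairs; infer_instance

-- ===== CLAIM (what is proved, stated in full; the proofs are below) =====
def Claim_equal_find_row_sum_pairs : Prop := ∀ (var : Int) (all_vars : List Int), Dom_find_row_sum_pairs var all_vars → Pre_find_row_sum_pairs var all_vars → Spec_find_row_sum_pairs var all_vars (find_row_sum_pairs var all_vars)

-- ===== LEMMAS AND PROOFS =====

-- A's loop with power 1 emits disjoint consecutive pairs [2k, 2k+1]
theorem pvLoopA_one (m : Nat) :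
    (List.range (m + 1)).foldl (pvBodyA 1) ([], 1, 0) =
      (((List.range (m + 1)).map (fun k => [2 * (k : Int), 2 * (k : Int) + 1])),
        2 * (m : Int) + 1, 2 * (m : Int) + 1) := by
  induction m with
  | zero => simp [pvBodyA]
  | succ n ih =>
    rw [List.range_succ, List.foldl_append, ih]
    simp only [List.foldl_cons, List.foldl_nil, pvBodyA]
    rw [if_neg (by omega)]
    simp only [Prod.mk.injEq]
    push_cast
    refine ⟨by simp; constructor <;> ring, by ring, by ring⟩

-- A's loop with power s ≥ 2 emits the overlapping pairs [k, k+s]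
theorem pvLoopA_big (s : Int) (hs : 2 ≤ s) (m : Nat) :
    (List.range (m + 1)).foldl (pvBodyA s) ([], 1, 0) =
      (((List.range (m + 1)).map (fun k => [(k : Int), (k : Int) + s])),
        (m : Int) + s, (m : Int) + 1) := by
  induction m with
  | zero => simp [pvBodyA]
  | succ n ih =>
    rw [List.range_succ, List.foldl_append, ih]
    simp only [List.foldl_cons, List.foldl_nil, pvBodyA]
    rw [if_pos (by omega)]
    simp only [Prod.mk.injEq]
    push_cast
    refine ⟨by simp, by ring, by ring⟩

-- ===== VERDICT (by name: the statement is the Claim_ definition above) =====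
theorem find_row_sum_pairs_spec : Claim_equal_find_row_sum_pairs := by
  intro var all_vars _ hpre
  unfold Spec_find_row_sum_pairs find_row_sum_pairs find_row_sum_pairs_alt
  obtain ⟨idx, hidx⟩ := Option.isSome_iff_exists.mp ((PySem.List.index?_isSome_iff all_vars var).mpr hpre)
  rw [hidx]
  simp only []
  set p : Nat := all_vars.length - 1 - idx with hp
  obtain ⟨m, hm⟩ : ∃ m, 2 ^ (all_vars.length - 1) = m + 1 :=
    ⟨2 ^ (all_vars.length - 1) - 1, by have := Nat.one_le_two_pow (n := all_vars.length - 1); omega⟩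
  rw [hm]
  by_cases hp0 : p = 0
  · rw [hp0]
    simp only [pow_zero]
    rw [pvLoopA_one m]
    norm_num
  · have hs : (2:Int) ≤ 2 ^ p := by
      calc (2:Int) = 2 ^ 1 := by norm_num
        _ ≤ 2 ^ p := by
          apply pow_le_pow_right₀ (by norm_num) (by omega)
    rw [pvLoopA_big _ hs m]
    have : ((2:Int) ^ p == 1) = false := by
      simp only [beq_eq_false_iff_ne, ne_eq]
      omega
    rw [this]
    simp
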